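-- pv_equiv track=rewrite | github.com/kkr010128/codebert | problem181/problem181_9.py | f
-- ===== SOURCE A (Python) =====
-- def f(n, k, a):
--     if k == n:
--         return 1
--     res = 0
--     res += f(n, k+1, a)
--     if a > 0:
--         res += f(n, k+1, a-1)
--     if a < 9:
--         res += f(n, k+1, a+1)
--     return res
-- ===== SOURCE B (Python) =====
-- def f(n, k, a):
--     d = n - k
--     # row[j] holds the count for starting value lo + j with 0 steps taken;
--     # each pass consumes one step and shrinks the window by one on each side.
--     row = [1] * (2 * d + 1)
--     lo = a - d
--     for _ in range(d):
--         lo += 1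
--         row = [row[j + 1]
--                + (row[j] if lo + j > 0 else 0)
--                + (row[j + 2] if lo + j < 9 else 0)
--                for j in range(len(row) - 2)]
--     return row[0]
-- ===== Notes on version B (the rewrite author's own statement) =====
-- stated objective: faster
-- what changed: Replaces the 3-way branching recursion by an iterative bottom-up DP over a shrinking window of values, so each (depth,value) state is computed once; intended as faster (O((n-k)^2) vs O(3^(n-k))) - in timing runs A times out at depths where B still returns, though the probe could not certify a ratio.
import Mathlib
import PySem

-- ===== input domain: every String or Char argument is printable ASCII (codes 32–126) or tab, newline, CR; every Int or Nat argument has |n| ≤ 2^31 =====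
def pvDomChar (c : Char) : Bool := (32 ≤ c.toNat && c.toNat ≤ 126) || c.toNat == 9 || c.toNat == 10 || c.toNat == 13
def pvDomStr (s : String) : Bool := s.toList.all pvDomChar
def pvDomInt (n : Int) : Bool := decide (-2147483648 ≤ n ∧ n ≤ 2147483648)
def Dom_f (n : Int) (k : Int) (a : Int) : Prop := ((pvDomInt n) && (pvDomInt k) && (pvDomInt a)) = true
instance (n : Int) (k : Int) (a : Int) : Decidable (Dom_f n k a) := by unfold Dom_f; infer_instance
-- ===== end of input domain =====

-- B replaces the 3-way branching recursion by an iterative bottom-up DP over a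
-- shrinking window of values, computing each (depth,value) state once (intended as faster:
-- in timing runs A times out at depths where B returns, though the probe could not certify
-- a ratio); return values agree on Pre_f (k ≤ n).

-- ===== PORT A =====
-- A recurses on k until k == n; under Pre_f (k ≤ n) the fuel (n-k).toNat counts
-- exactly the remaining recursion depth, so this is a literal fuelled transliteration.
def fgo : Nat → Int → Int
  | 0, _ => 1
  | d+1, a =>
      fgo d a
      + (if a > 0 then fgo d (a-1) else 0)
      + (if a < 9 then fgo d (a+1) else 0)

def f (n : Int) (k : Int) (a : Int) : Int := fgo (n - k).toNat a

-- ===== PORT B =====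
-- one loop body of Source B: the list comprehension over range(len(row)-2)
def bstep (lo : Int) (row : List Int) : List Int :=
  (List.range (row.length - 2)).map (fun j =>
    row.getD (j+1) 0
    + (if lo + (j : Int) > 0 then row.getD j 0 else 0)
    + (if lo + (j : Int) < 9 then row.getD (j+2) 0 else 0))

-- the for-loop of Source B ('lo += 1' then rebuild row), run d times
def bloop : Nat → Int → List Int → List Int
  | 0, _, row => row
  | i+1, lo, row => bloop i (lo + 1) (bstep (lo + 1) row)

def f_alt (n : Int) (k : Int) (a : Int) : Int :=
  let d := n - k
  let row := List.replicate (2*d + 1).toNat 1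
  (bloop d.toNat (a - d) row).getD 0 0

-- ===== PRECONDITION & SPEC =====
-- Pre_f: A recurses with k+1 until k == n, so for k > n it never terminates
-- (RecursionError); Source B raises IndexError there too. Exactly k ≤ n is admitted.
def Pre_f (n : Int) (k : Int) (a : Int) : Prop := k ≤ n
instance (n : Int) (k : Int) (a : Int) : Decidable (Pre_f n k a) := by unfold Pre_f; infer_instance
def pvWitness_f : Int × Int × Int := (3, 0, 5)

def Spec_f (n : Int) (k : Int) (a : Int) (out : Int) : Prop := out = f_alt n k a
instance (n : Int) (k : Int) (a : Int) (out : Int) : Decidable (Spec_f n k a out) := by unfold Spec_f; infer_instance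

-- ===== CLAIM (what is proved, stated in full; the proofs are below) =====
def Claim_equal_f : Prop := ∀ (n : Int) (k : Int) (a : Int), Dom_f n k a → Pre_f n k a → Spec_f n k a (f n k a)

-- ===== LEMMAS AND PROOFS =====

lemma bstep_length (lo : Int) (row : List Int) : (bstep lo row).length = row.length - 2 := by
  simp [bstep]

lemma bstep_getD (lo : Int) (row : List Int) (j : Nat) (hj : j < row.length - 2) :
    (bstep lo row).getD j 0 =
      row.getD (j+1) 0
      + (if lo + (j : Int) > 0 then row.getD j 0 else 0)
      + (if lo + (j : Int) < 9 then row.getD (j+2) 0 else 0) := by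
  simp [bstep, List.getD, List.getElem?_map, hj]

lemma bloop_spec : ∀ (i m : Nat) (lo : Int) (row : List Int),
    row.length = 2*i + 1 →
    (∀ j : Nat, j < row.length → row.getD j 0 = fgo m (lo + (j : Int))) →
    (bloop i lo row).getD 0 0 = fgo (m + i) (lo + (i : Int)) := by
  intro i
  induction i with
  | zero =>
      intro m lo row hlen hrow
      simpa using hrow 0 (by omega)
  | succ i ih =>
      intro m lo row hlen hrow
      have hlen' : (bstep (lo + 1) row).length = 2*i + 1 := by
        rw [bstep_length, hlen]; omega
      have hrow' : ∀ j : Nat, j < (bstep (lo + 1) row).length →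
          (bstep (lo + 1) row).getD j 0 = fgo (m + 1) ((lo + 1) + (j : Int)) := by
        intro j hj
        rw [hlen'] at hj
        rw [bstep_getD (lo+1) row j (by omega)]
        rw [hrow (j+1) (by omega), hrow j (by omega), hrow (j+2) (by omega)]
        have h1 : lo + ((j : Int) + 1) = (lo + 1) + (j : Int) := by ring
        have h2 : lo + (j : Int) = ((lo + 1) + (j : Int)) - 1 := by ring
        have h3 : lo + ((j : Int) + 2) = ((lo + 1) + (j : Int)) + 1 := by ring
        push_cast
        rw [h1, h2, h3]
        rcases (lo + 1) + (j : Int) with v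
        all_goals simp [fgo]
      have := ih (m+1) (lo+1) (bstep (lo+1) row) hlen' hrow'
      rw [show bloop (i+1) lo row = bloop i (lo+1) (bstep (lo+1) row) from rfl, this]
      congr 1
      · omega
      · push_cast; ring

-- ===== VERDICT (by name: the statement is the Claim_ definition above) =====
theorem f_spec : Claim_equal_f := by
  intro n k a _ hpre
  have hkn : k ≤ n := hpre
  unfold Spec_f f f_alt
  have hd : (0 : Int) ≤ n - k := by omega
  have h2d : (2*(n-k) + 1).toNat = 2*(n-k).toNat + 1 := by omega
  have hrow : ∀ j : Nat, j < (List.replicate (2*(n-k)+1).toNat (1:Int)).length →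
      (List.replicate (2*(n-k)+1).toNat (1:Int)).getD j 0 = fgo 0 ((a - (n-k)) + (j : Int)) := by
    intro j hj
    simp [List.getD, List.getElem?_replicate] at hj ⊢
    simp [hj, fgo]
  have := bloop_spec (n-k).toNat 0 (a - (n-k)) (List.replicate (2*(n-k)+1).toNat 1)
    (by simp [h2d]) hrow
  rw [this, Nat.zero_add]
  have hx : a - (n - k) + (((n - k).toNat : Nat) : Int) = a := by omega
  rw [hx]
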